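-- pv_equiv track=rewrite | github.com/garvonious-ui/cuervo-intel | autostrat_parser.py | deinterleave_columns
-- ===== SOURCE A (Python) =====
-- def deinterleave_columns(lines: list[str], n_cols: int) -> list[list[str]]:
--     """De-interleave text lines from a multi-column PDF layout.
--
--     First columns may have more lines than later columns due to vertical
--     offset in the PDF grid. Pattern: partial first group (remainder columns),
--     then full groups of n_cols.
--     """
--     n_lines = len(lines)
--     remainder = n_lines % n_cols
--     columns: list[list[str]] = [[] for _ in range(n_cols)]
--     idx = 0
--     # Partial first group: first `remainder` columns get one extra line
--     for col in range(remainder):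
--         if idx < n_lines:
--             columns[col].append(lines[idx])
--             idx += 1
--     # Full groups
--     while idx < n_lines:
--         for col in range(n_cols):
--             if idx < n_lines:
--                 columns[col].append(lines[idx])
--                 idx += 1
--     return columns
-- ===== SOURCE B (Python) =====
-- def deinterleave_columns(lines: list[str], n_cols: int) -> list[list[str]]:
--     """De-interleave text lines from a multi-column PDF layout.
--
--     Column j is the strided slice of the lines after the partial first
--     group, preceded by its extra line when j falls in the remainder.
--     """
--     remainder = len(lines) % n_cols
--     return [
--         ([lines[j]] if j < remainder else []) + lines[remainder + j :: n_cols]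
--         for j in range(n_cols)
--     ]
-- ===== Notes on version B (the rewrite author's own statement) =====
-- stated objective: simpler
-- what changed: Each column is extracted directly as a strided slice lines[remainder+j::n_cols] (plus its extra remainder line), replacing the stateful idx walk with nested distribution loops.
import Mathlib
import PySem

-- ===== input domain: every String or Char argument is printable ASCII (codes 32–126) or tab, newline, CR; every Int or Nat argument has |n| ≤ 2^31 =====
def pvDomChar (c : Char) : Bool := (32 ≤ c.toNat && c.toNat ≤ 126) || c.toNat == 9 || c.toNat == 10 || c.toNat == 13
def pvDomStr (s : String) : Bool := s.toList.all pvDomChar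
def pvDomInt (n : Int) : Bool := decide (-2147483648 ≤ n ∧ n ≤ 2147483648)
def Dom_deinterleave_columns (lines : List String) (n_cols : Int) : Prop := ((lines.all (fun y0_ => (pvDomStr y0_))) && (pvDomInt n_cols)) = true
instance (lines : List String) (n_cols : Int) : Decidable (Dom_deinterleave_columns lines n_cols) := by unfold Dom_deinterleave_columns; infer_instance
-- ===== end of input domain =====

-- B replaces A's stateful idx walk with per-column strided slices; objective: simpler.

-- ===== PORT A =====
-- `columns[col].append(x)`: replace the list at position `col` by itself ++ [x]
def pvAppendAt : List (List String) → Nat → String → List (List String)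
  | [], _, _ => []
  | c :: cs, 0, x => (c ++ [x]) :: cs
  | c :: cs, n+1, x => c :: pvAppendAt cs n x

-- the loop body `if idx < n_lines: columns[col].append(lines[idx]); idx += 1`
-- (`lines.getD st.2 ""` is exact: the guard ensures 0 ≤ idx < len(lines))
def pvStep (lines : List String) (st : List (List String) × Nat) (col : Int) :
    List (List String) × Nat :=
  if st.2 < lines.length then
    (pvAppendAt st.1 col.toNat (lines.getD st.2 ""), st.2 + 1)
  else st

-- `while idx < n_lines: for col in range(n_cols): …` — fuel bounds the number of
-- while-iterations; under Pre_ each pass advances idx by n_cols ≥ 1, so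
-- lines.length + 1 iterations are never exhausted (the fuel is only a totality guard)
def pvWhile (lines : List String) (n_cols : Int) :
    Nat → List (List String) × Nat → List (List String) × Nat
  | 0, st => st
  | fuel+1, st =>
      if st.2 < lines.length then
        pvWhile lines n_cols fuel ((PySem.List.pyRange 0 n_cols 1).foldl (pvStep lines) st)
      else st

def deinterleave_columns (lines : List String) (n_cols : Int) : List (List String) :=
  let remainder := PySem.Int.mod (lines.length : Int) n_cols
  let columns : List (List String) := (PySem.List.pyRange 0 n_cols 1).map (fun _ => [])
  let st := (PySem.List.pyRange 0 remainder 1).foldl (pvStep lines) (columns, 0)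
  (pvWhile lines n_cols (lines.length + 1) st).1

-- ===== PORT B =====
-- `lines[j]` is in range at every use (0 ≤ j < remainder ≤ len), and the slice step
-- n_cols is nonzero whenever range(n_cols) is nonempty, so the .getD defaults never fire
def deinterleave_columns_alt (lines : List String) (n_cols : Int) : List (List String) :=
  let remainder := PySem.Int.mod (lines.length : Int) n_cols
  (PySem.List.pyRange 0 n_cols 1).map (fun j =>
    (if j < remainder then [PySem.List.pyGetD lines j ""] else [])
      ++ (PySem.List.slice? lines (some (remainder + j)) none n_cols).getD [])

-- ===== PRECONDITION & SPEC =====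
-- Pre_ excludes n_cols = 0, where A raises ZeroDivisionError, and n_cols < 0 with
-- nonempty lines, where A loops forever (range(n_cols) is empty so idx never advances).
def Pre_deinterleave_columns (lines : List String) (n_cols : Int) : Prop :=
  0 < n_cols ∨ (n_cols < 0 ∧ lines = [])
instance (lines : List String) (n_cols : Int) : Decidable (Pre_deinterleave_columns lines n_cols) := by unfold Pre_deinterleave_columns; infer_instance
def pvWitness_deinterleave_columns : List String × Int := (["a", "b", "c"], 2)

def Spec_deinterleave_columns (lines : List String) (n_cols : Int) (out : List (List String)) : Prop := out = deinterleave_columns_alt lines n_cols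
instance (lines : List String) (n_cols : Int) (out : List (List String)) : Decidable (Spec_deinterleave_columns lines n_cols out) := by unfold Spec_deinterleave_columns; infer_instance

-- ===== CLAIM (what is proved, stated in full; the proofs are below) =====
def Claim_equal_deinterleave_columns : Prop := ∀ (lines : List String) (n_cols : Int), Dom_deinterleave_columns lines n_cols → Pre_deinterleave_columns lines n_cols → Spec_deinterleave_columns lines n_cols (deinterleave_columns lines n_cols)

-- ===== LEMMAS AND PROOFS =====

-- every (c+1)-th element of `lines` starting at index i (= lines[i::c+1])
def pvStride (lines : List String) (c : Nat) (i : Nat) : List String :=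
  if h : i < lines.length then lines[i] :: pvStride lines c (i + c + 1) else []
termination_by lines.length - i
decreasing_by omega

-- append lines[idx+j] to the j-th column (effect of one full round-robin group)
def pvBump (lines : List String) : Nat → List (List String) → List (List String)
  | _, [] => []
  | idx, col :: cs => (col ++ [lines.getD idx ""]) :: pvBump lines (idx+1) cs

-- append the stride starting at idx+j to the j-th column
def pvStrideAll (lines : List String) (c : Nat) : Nat → List (List String) → List (List String)
  | _, [] => []
  | idx, col :: cs => (col ++ pvStride lines c idx) :: pvStrideAll lines c (idx+1) cs

theorem pvStride_stop (lines : List String) (c i : Nat) (h : lines.length ≤ i) :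
    pvStride lines c i = [] := by
  rw [pvStride]; simp [Nat.not_lt.2 h]

theorem pvStride_cons (lines : List String) (c i : Nat) (h : i < lines.length) :
    pvStride lines c i = lines[i] :: pvStride lines c (i + c + 1) := by
  rw [pvStride]; simp [h]

theorem pvAppendAt_append (pre : List (List String)) (c : List String)
    (cs : List (List String)) (x : String) :
    pvAppendAt (pre ++ c :: cs) pre.length x = pre ++ (c ++ [x]) :: cs := by
  induction pre with
  | nil => simp [pvAppendAt]
  | cons p ps ih => simp [pvAppendAt, ih]

theorem pvBump_length (lines : List String) (idx : Nat) (cols : List (List String)) :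
    (pvBump lines idx cols).length = cols.length := by
  induction cols generalizing idx with
  | nil => rfl
  | cons c cs ih => simp [pvBump, ih]

theorem pvStrideAll_length (lines : List String) (c idx : Nat) (cols : List (List String)) :
    (pvStrideAll lines c idx cols).length = cols.length := by
  induction cols generalizing idx with
  | nil => rfl
  | cons col cs ih => simp [pvStrideAll, ih]

theorem pvStrideAll_getElem (lines : List String) (c idx : Nat)
    (cols : List (List String)) (j : Nat) (hj : j < cols.length) :
    (pvStrideAll lines c idx cols)[j]'(by rw [pvStrideAll_length]; exact hj)
      = cols[j] ++ pvStride lines c (idx + j) := by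
  induction cols generalizing idx j with
  | nil => simp at hj
  | cons col cs ih =>
    cases j with
    | zero => simp [pvStrideAll]
    | succ k =>
      have hk : k < cs.length := by simp at hj; omega
      have harg : idx + (k+1) = (idx+1) + k := by omega
      simp only [pvStrideAll, List.getElem_cons_succ]
      rw [ih (idx+1) k hk, harg]

theorem pvBump_getElem (lines : List String) (idx : Nat)
    (cols : List (List String)) (j : Nat) (hj : j < cols.length) :
    (pvBump lines idx cols)[j]'(by rw [pvBump_length]; exact hj)
      = cols[j] ++ [lines.getD (idx + j) ""] := by
  induction cols generalizing idx j with
  | nil => simp at hj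
  | cons col cs ih =>
    cases j with
    | zero => simp [pvBump]
    | succ k =>
      have hk : k < cs.length := by simp at hj; omega
      have harg : idx + (k+1) = (idx+1) + k := by omega
      simp only [pvBump, List.getElem_cons_succ]
      rw [ih (idx+1) k hk, harg]

-- the inner for-loop over range(a, b): distributes cols.length lines round-robin
theorem pv_fold_range (lines : List String) (b : Int) :
    ∀ (cols : List (List String)) (a : Int) (pre post : List (List String)) (idx : Nat),
      0 ≤ a → pre.length = a.toNat → cols.length = (b - a).toNat →
      idx + cols.length ≤ lines.length →
      (PySem.List.pyRange a b 1).foldl (pvStep lines) (pre ++ cols ++ post, idx)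
        = (pre ++ pvBump lines idx cols ++ post, idx + cols.length) := by
  intro cols
  induction cols with
  | nil =>
    intro a pre post idx ha hpre hlen hidx
    rw [PySem.List.pyRange_one_eq_nil (by simp at hlen; omega)]
    simp [pvBump]
  | cons col cs ih =>
    intro a pre post idx ha hpre hlen hidx
    rw [PySem.List.pyRange_one_cons (by simp at hlen; omega)]
    simp only [List.foldl_cons]
    have hstep : pvStep lines (pre ++ (col :: cs) ++ post, idx) a
        = ((pre ++ [col ++ [lines.getD idx ""]]) ++ cs ++ post, idx + 1) := by
      simp only [pvStep]
      rw [if_pos (by simp at hidx ⊢; omega)]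
      have : a.toNat = pre.length := hpre.symm
      have hrw : pre ++ (col :: cs) ++ post = pre ++ col :: (cs ++ post) := by simp
      rw [hrw, this, pvAppendAt_append]
      simp
    rw [hstep, ih (a+1) (pre ++ [col ++ [lines.getD idx ""]]) post (idx+1)
        (by omega) (by simp; omega) (by simp at hlen ⊢; omega) (by simp at hidx ⊢; omega)]
    simp [pvBump]
    omega

theorem pvStrideAll_stop (lines : List String) (c : Nat) :
    ∀ (cols : List (List String)) (idx : Nat), lines.length ≤ idx →
      pvStrideAll lines c idx cols = cols := by
  intro cols
  induction cols with
  | nil => intro idx _; rfl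
  | cons col cs ih =>
    intro idx h
    simp [pvStrideAll, pvStride_stop lines c idx h, ih (idx+1) (by omega)]

theorem pvStrideAll_bump (lines : List String) (c : Nat) :
    ∀ (cols : List (List String)) (idx : Nat), idx + cols.length ≤ lines.length →
      pvStrideAll lines c (idx + (c+1)) (pvBump lines idx cols)
        = pvStrideAll lines c idx cols := by
  intro cols
  induction cols with
  | nil => intro idx _; rfl
  | cons col cs ih
  =>
    intro idx h
    have h1 : idx < lines.length := by simp at h; omega
    have h2 : idx + (c+1) + 1 = (idx+1) + (c+1) := by omega
    simp only [pvBump, pvStrideAll]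
    rw [pvStride_cons lines c idx h1, h2, ih (idx+1) (by simp at h; omega)]
    simp [List.getD_eq_getElem?_getD, List.getElem?_eq_getElem h1, Nat.add_assoc]

theorem pv_while_spec (lines : List String) (n_cols : Int) (c : Nat)
    (hc : n_cols = (c : Int) + 1) :
    ∀ (fuel : Nat) (idx : Nat) (cols : List (List String)),
      idx ≤ lines.length → (c+1) ∣ (lines.length - idx) →
      lines.length - idx ≤ fuel * (c+1) → cols.length = c + 1 →
      pvWhile lines n_cols fuel (cols, idx)
        = (pvStrideAll lines c idx cols, lines.length) := by
  intro fuel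
  induction fuel with
  | zero =>
    intro idx cols hle hdvd hfuel hlen
    have h0 : idx = lines.length := by omega
    subst h0
    simp [pvWhile, pvStrideAll_stop lines c cols _ le_rfl]
  | succ fuel ih =>
    intro idx cols hle hdvd hfuel hlen
    by_cases hidx : idx < lines.length
    · obtain ⟨k, hk⟩ := hdvd
      have hstep : idx + (c+1) ≤ lines.length := by
        cases k with
        | zero => omega
        | succ k' => simp [Nat.mul_succ] at hk; omega
      rw [pvWhile, if_pos hidx]
      have hfold := pv_fold_range lines n_cols cols 0 [] [] idx (le_refl 0)
        rfl (by simp [hlen, hc]) (by omega)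
      simp only [List.nil_append, List.append_nil] at hfold
      rw [hfold]
      have hdvd2 : (c+1) ∣ (lines.length - (idx + cols.length)) := by
        refine ⟨k - 1, ?_⟩
        cases k with
        | zero => omega
        | succ k' => simp [Nat.mul_succ] at hk ⊢; omega
      have hmul : (fuel + 1) * (c+1) = fuel * (c+1) + (c+1) := by ring
      rw [ih (idx + cols.length) (pvBump lines idx cols)
        (by omega) hdvd2 (by omega) (by rw [pvBump_length]; exact hlen)]
      rw [hlen]
      rw [show idx + (c+1) = idx + (c+1) from rfl] at hstep
      rw [pvStrideAll_bump lines c cols idx (by omega)]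
    · have h0 : idx = lines.length := by omega
      subst h0
      rw [pvWhile, if_neg (by omega)]
      simp [pvStrideAll_stop lines c cols _ le_rfl]

-- count of elements picked by lines[t::c+1]
def pvCnt (len c t : Nat) : Nat := if t < len then (len - t + c) / (c+1) else 0

theorem pv_filter_stride (lines : List String) (c : Nat) (t : Nat) :
    List.filterMap (fun k => lines[(t + (c+1)*k)]?) (List.range (pvCnt lines.length c t))
      = pvStride lines c t := by
  by_cases h : t < lines.length
  · have hcnt : pvCnt lines.length c t = pvCnt lines.length c (t + c + 1) + 1 := by
      unfold pvCnt
      rw [if_pos h]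
      have h1 : lines.length - t + c = (lines.length - t - 1) + (c+1) := by omega
      rw [h1, Nat.add_div_right _ (Nat.succ_pos c)]
      by_cases h2 : t + c + 1 < lines.length
      · rw [if_pos h2, show lines.length - (t+c+1) + c = lines.length - t - 1 from by omega]
      · rw [if_neg h2, Nat.div_eq_of_lt (by omega)]
    rw [hcnt, List.range_succ_eq_map, List.filterMap_cons]
    have hf0 : lines[(t + (c+1)*0)]? = some (lines[t]'h) := by
      simp [List.getElem?_eq_getElem h]
    rw [hf0, List.filterMap_map]
    have hfun : ((fun k => lines[(t + (c+1)*k)]?) ∘ Nat.succ)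
        = (fun k => lines[((t + c + 1) + (c+1)*k)]?) := by
      funext k
      simp only [Function.comp]
      congr 1
      rw [Nat.mul_succ]
      omega
    rw [hfun, pv_filter_stride lines c (t + c + 1), pvStride_cons lines c t h]
  · unfold pvCnt
    rw [if_neg h]
    simp [pvStride_stop lines c t (by omega)]
termination_by lines.length - t
decreasing_by omega

theorem pv_slice_stride (lines : List String) (c : Nat) (s : Int) (hs : 0 ≤ s) :
    (PySem.List.slice? lines (some s) none ((c:Int)+1)).getD [] = pvStride lines c s.toNat := by
  obtain ⟨t, rfl⟩ : ∃ t : Nat, s = (t:Int) := ⟨s.toNat, by omega⟩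
  rw [Int.toNat_natCast]
  simp only [PySem.List.slice?, PySem.List.sliceIndices]
  rw [if_neg (by omega : ¬((c:Int)+1 = 0))]
  simp only [show ¬((c:Int)+1 < 0) from by omega, if_false, if_neg (by omega : ¬ (t:Int) < 0),
    if_pos (by omega : (0:Int) < (c:Int)+1)]
  by_cases h : t < lines.length
  · rw [min_eq_left (by exact_mod_cast h.le), if_pos (by exact_mod_cast h)]
    have hcount : (((lines.length:Int) - (t:Int) + ((c:Int)+1) - 1) / ((c:Int)+1)).toNat
        = pvCnt lines.length c t := by
      have h1 : (lines.length:Int) - (t:Int) + ((c:Int)+1) - 1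
          = ((lines.length - t + c : Nat) : Int) := by push_cast [Nat.le_of_lt h]; omega
      rw [h1, show ((c:Int)+1) = ((c+1 : Nat):Int) from by push_cast; ring,
        ← Int.natCast_div, Int.toNat_natCast]
      unfold pvCnt
      rw [if_pos h]
    have hfun : (fun x : Nat => lines[((t:Int) + ((c:Int)+1) * (x:Int)).toNat]?)
        = (fun x : Nat => lines[t + (c+1)*x]?) := by
      funext x
      congr 1
    rw [hcount, hfun, Option.getD_some, pv_filter_stride]
  · have hle : lines.length ≤ t := Nat.not_lt.1 h
    rw [min_eq_right (by exact_mod_cast hle), if_neg (lt_irrefl _)]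
    simp [pvStride_stop lines c t hle]

theorem deinterleave_columns_spec : Claim_equal_deinterleave_columns := by
  intro lines n_cols _ hpre
  unfold Spec_deinterleave_columns
  rcases hpre with hpos | ⟨hneg, hnil⟩
  · -- 0 < n_cols
    set c : Nat := n_cols.toNat - 1 with hc_def
    have hc : n_cols = (c : Int) + 1 := by omega
    set R : Int := PySem.Int.mod (lines.length : Int) n_cols with hR_def
    have hR0 : 0 ≤ R := PySem.Int.mod_nonneg _ hpos
    have hRlt : R < n_cols := PySem.Int.mod_lt _ hpos
    have hRemod : R = (lines.length : Int) % n_cols := PySem.Int.mod_eq_emod_of_pos hpos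
    have hRlen : R ≤ (lines.length : Int) := by
      by_cases h : (lines.length : Int) < n_cols
      · rw [hRemod, Int.emod_eq_of_lt (by positivity) h]
      · omega
    set r : Nat := R.toNat with hr_def
    have hrc : r ≤ c := by omega
    have hrlen : r ≤ lines.length := by omega
    have hdvdInt : n_cols ∣ ((lines.length : Int) - R) :=
      ⟨(lines.length : Int) / n_cols,
        by have := Int.mul_ediv_add_emod (lines.length : Int) n_cols; rw [hRemod]; linarith⟩
    have hdvdNat : (c+1) ∣ (lines.length - r) := by
      have h1 : ((c:Int)+1) ∣ ((lines.length - r : Nat) : Int) := by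
        rw [← hc, show ((lines.length - r : Nat) : Int) = (lines.length : Int) - R from by
          push_cast [hrlen]; omega]
        exact hdvdInt
      exact_mod_cast h1
    have hA : deinterleave_columns lines n_cols
        = (pvWhile lines n_cols (lines.length + 1)
            ((PySem.List.pyRange 0 R 1).foldl (pvStep lines)
              ((PySem.List.pyRange 0 n_cols 1).map (fun _ => []), 0))).1 := rfl
    have hcols : (PySem.List.pyRange 0 n_cols 1).map (fun _ => ([] : List String))
        = List.replicate r [] ++ List.replicate (c+1-r) [] := by
      simp only [PySem.List.pyRange_zero, List.map_map]
      rw [show ((fun _ => ([] : List String)) ∘ (fun (k : Nat) => (k : Int))) = fun _ => ([] : List String) from rfl]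
      rw [List.map_const', List.length_range, ← List.replicate_add]
      congr 1
      omega
    have hfold := pv_fold_range lines R (List.replicate r []) 0 [] (List.replicate (c+1-r) []) 0
      le_rfl rfl (by simpa using hr_def) (by simpa using hrlen)
    simp only [List.nil_append, Nat.zero_add, List.length_replicate] at hfold
    have hwhile := pv_while_spec lines n_cols c hc (lines.length + 1) r
      (pvBump lines 0 (List.replicate r []) ++ List.replicate (c+1-r) [])
      hrlen hdvdNat
      (le_trans (by omega) (Nat.le_mul_of_pos_right (lines.length+1) (show 0 < c+1 by omega)))
      (by simp [pvBump_length]; omega)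
    rw [hA, hcols, hfold, hwhile]
    have hB : deinterleave_columns_alt lines n_cols
        = (PySem.List.pyRange 0 n_cols 1).map (fun j =>
            (if j < R then [PySem.List.pyGetD lines j ""] else [])
              ++ (PySem.List.slice? lines (some (R + j)) none n_cols).getD []) := rfl
    rw [hB]
    have hlen0 : (pvBump lines 0 (List.replicate r []) ++ List.replicate (c+1-r) []).length = c+1 := by
      simp [pvBump_length]
      omega
    apply List.ext_getElem
    · simp [pvStrideAll_length, pvBump_length, PySem.List.pyRange_zero]
      omega
    · intro j hj hj2
      have hjc : j < c + 1 := by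
        rw [pvStrideAll_length, hlen0] at hj
        exact hj
      have hRHS : ((PySem.List.pyRange 0 n_cols 1).map (fun j =>
            (if j < R then [PySem.List.pyGetD lines j ""] else [])
              ++ (PySem.List.slice? lines (some (R + j)) none n_cols).getD []))[j]'hj2
          = (if (j:Int) < R then [PySem.List.pyGetD lines (j:Int) ""] else [])
              ++ (PySem.List.slice? lines (some (R + (j:Int))) none n_cols).getD [] := by
        simp only [PySem.List.pyRange_zero, List.map_map, List.getElem_map, List.getElem_range]
        rfl
      rw [hRHS, pvStrideAll_getElem lines c r _ j (by rw [hlen0]; exact hjc)]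
      rw [hc, pv_slice_stride lines c (R + (j:Int)) (by omega)]
      rw [show (R + (j:Int)).toNat = r + j from by omega]
      congr 1
      by_cases hjr : j < r
      · rw [if_pos (show (j:Int) < R from by omega)]
        rw [List.getElem_append_left (by rw [pvBump_length, List.length_replicate]; exact hjr)]
        rw [pvBump_getElem lines 0 _ j (by rw [List.length_replicate]; exact hjr)]
        simp [PySem.List.pyGetD_natCast]
      · rw [if_neg (show ¬ (j:Int) < R from by omega)]
        rw [List.getElem_append_right (by rw [pvBump_length, List.length_replicate]; omega)]
        simp
  · -- n_cols < 0 and lines = []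
    subst hnil
    have hA : deinterleave_columns [] n_cols = [] := by
      have h0 : deinterleave_columns [] n_cols
          = (pvWhile [] n_cols ((List.length ([] : List String)) + 1)
              ((PySem.List.pyRange 0 (PySem.Int.mod ((List.length ([] : List String)) : Int) n_cols) 1).foldl
                (pvStep [])
                ((PySem.List.pyRange 0 n_cols 1).map (fun _ => []), 0))).1 := rfl
      rw [h0, show PySem.Int.mod ((List.length ([] : List String)) : Int) n_cols = 0 from by
          simp [PySem.Int.mod],
        PySem.List.pyRange_one_eq_nil (le_refl (0 : Int)),
        PySem.List.pyRange_one_eq_nil (show n_cols ≤ 0 from le_of_lt hneg)]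
      simp [pvWhile]
    have hB : deinterleave_columns_alt [] n_cols = [] := by
      unfold deinterleave_columns_alt
      rw [PySem.List.pyRange_one_eq_nil (show n_cols ≤ 0 from le_of_lt hneg)]
      simp
    rw [hA, hB]
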